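-- pv_equiv track=rewrite | github.com/sophialuo/CrackingTheCodingInterview_6thEdition | 16.15.py | calculate_hits
-- ===== SOURCE A (Python) =====
-- def calculate_hits(guess, actual):
-- 	guess = list(guess)
-- 	actual = list(actual)
-- 	hit = 0
-- 	for i in range(len(guess)):
-- 		if guess[i] == actual[i]:
-- 			hit += 1
-- 			actual[i], guess[i] = "-", "-" #avoid double counting
--
-- 	pseudohit = 0
-- 	for i in range(len(actual)):
-- 		if actual[i] != "-" and actual[i] in guess:
-- 			pseudohit += 1
-- 			guess[guess.index(actual[i])] = "-"
-- 			actual[i] = "-"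
--
--
-- 	return (hit, pseudohit)
-- ===== SOURCE B (Python) =====
-- def calculate_hits(guess, actual):
--     # hits = matching positions; pseudohits = total multiset color overlap
--     # between the two strings minus the exact hits.
--     hit = sum(g == a for g, a in zip(guess, actual))
--     counts = {}
--     for c in guess:
--         counts[c] = counts.get(c, 0) + 1
--     overlap = 0
--     for c in actual:
--         if counts.get(c, 0) > 0:
--             counts[c] -= 1
--             overlap += 1
--     return (hit, overlap - hit)
-- ===== Notes on version B (the rewrite author's own statement) =====
-- stated objective: faster
-- what changed: Replaces A's sentinel-marking passes (writing '-' into copies of both lists with linear membership scans and list.index inside the loop) by one zip sum for hits plus a dict tally of guess and a single decrementing scan of actual; pseudohits = total multiset color overlap minus hits.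
-- intended difference: On inputs where the character '-' occurs at a non-matching position of both strings, A returns fewer pseudohits because it uses '-' as its internal 'consumed' sentinel and silently refuses to count that color, while B counts '-' like any other color, which is the intended Mastermind overlap. — e.g. on calculate_hits("-a", "b-"): A returns [0, 0], B returns [0, 1]
import Mathlib
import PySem

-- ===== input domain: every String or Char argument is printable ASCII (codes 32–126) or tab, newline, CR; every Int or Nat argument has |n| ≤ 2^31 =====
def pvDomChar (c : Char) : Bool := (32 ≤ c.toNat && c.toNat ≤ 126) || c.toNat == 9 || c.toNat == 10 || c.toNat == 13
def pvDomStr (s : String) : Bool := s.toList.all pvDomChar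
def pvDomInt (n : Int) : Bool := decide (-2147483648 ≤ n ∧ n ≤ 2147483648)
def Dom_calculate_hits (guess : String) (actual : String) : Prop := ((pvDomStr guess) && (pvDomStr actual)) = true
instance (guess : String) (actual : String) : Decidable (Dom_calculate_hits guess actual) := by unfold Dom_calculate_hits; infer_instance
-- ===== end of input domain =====

-- B replaces A's sentinel-marking passes by a hit sum plus one tally/decrement scan
-- (pseudohits = total multiset overlap minus hits); return-value equivalence only.

-- ===== PORT A =====
def calculate_hits (guess : String) (actual : String) : List Int :=
  -- guess = list(guess); actual = list(actual)
  let g0 := guess.toList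
  let a0 := actual.toList
  -- for i in range(len(guess)): if guess[i] == actual[i]: hit += 1; mark both with "-"
  let s1 := (PySem.List.pyRange 0 (PySem.List.len g0) 1).foldl
    (fun (s : Int × List Char × List Char) i =>
      match PySem.List.pyGet? s.2.1 i, PySem.List.pyGet? s.2.2 i with
      | some x, some y =>
          if x = y then (s.1 + 1, s.2.1.set i.toNat '-', s.2.2.set i.toNat '-') else s
      | _, _ => s)          -- IndexError in Python (only when len(guess) > len(actual); outside Pre_)
    (0, g0, a0)
  -- for i in range(len(actual)): if actual[i] != "-" and actual[i] in guess: …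
  let s2 := (PySem.List.pyRange 0 (PySem.List.len s1.2.2) 1).foldl
    (fun (s : Int × List Char × List Char) i =>
      match PySem.List.pyGet? s.2.2 i with
      | some c =>
          if c ≠ '-' ∧ c ∈ s.2.1 then
            (s.1 + 1, s.2.1.set ((PySem.List.index? s.2.1 c).getD 0) '-', s.2.2.set i.toNat '-')
          else s
      | none => s)          -- unreachable: i < len(actual)
    (0, s1.2.1, s1.2.2)
  [s1.1, s2.1]

-- ===== PORT B =====
def calculate_hits_alt (guess : String) (actual : String) : List Int :=
  -- hit = sum(g == a for g, a in zip(guess, actual))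
  let hit : Int := (guess.toList.zip actual.toList).foldl
    (fun h p => if p.1 = p.2 then h + 1 else h) 0
  -- counts = {}; for c in guess: counts[c] = counts.get(c, 0) + 1
  let counts := guess.toList.foldl
    (fun (d : PySem.Dict Char Int) c => d.insert c (d.getD c 0 + 1)) PySem.Dict.empty
  -- overlap = 0; for c in actual: if counts.get(c,0) > 0: counts[c] -= 1; overlap += 1
  let s := actual.toList.foldl
    (fun (s : Int × PySem.Dict Char Int) c =>
      if s.2.getD c 0 > 0 then (s.1 + 1, s.2.insert c (s.2.getD c 0 - 1)) else s)
    (0, counts)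
  [hit, s.1 - hit]

-- ===== PRECONDITION & SPEC =====
-- Pre_ excludes exactly the inputs where A raises IndexError (first loop reads actual[i] past its end).
def Pre_calculate_hits (guess : String) (actual : String) : Prop :=
  guess.toList.length ≤ actual.toList.length
instance (guess : String) (actual : String) : Decidable (Pre_calculate_hits guess actual) := by
  unfold Pre_calculate_hits; infer_instance
def pvWitness_calculate_hits : String × String := ("RGGB", "YRGB")

-- On inputs where '-' occurs at a non-matching position of both strings, A returns fewer
-- pseudohits ('-' is its internal consumed-sentinel, so that color is never counted), while B
-- counts '-' like any other color — the intended Mastermind multiset overlap.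
def D_calculate_hits (guess : String) (actual : String) : Prop :=
  0 < (guess.toList.zip actual.toList).countP (fun p => p.1 == '-' && p.1 != p.2) ∧
  0 < (guess.toList.zip actual.toList).countP (fun p => p.2 == '-' && p.1 != p.2)
      + (actual.toList.drop guess.toList.length).count '-'
instance (guess : String) (actual : String) : Decidable (D_calculate_hits guess actual) := by
  unfold D_calculate_hits; infer_instance

def Spec_calculate_hits (guess : String) (actual : String) (out : List Int) : Prop :=
  ¬ D_calculate_hits guess actual → out = calculate_hits_alt guess actual
instance (guess : String) (actual : String) (out : List Int) : Decidable (Spec_calculate_hits guess actual out) := by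
  unfold Spec_calculate_hits; infer_instance

def pvDiffWitness_calculate_hits : String × String := ("-a", "b-")
def pvDiffWitnessOut_calculate_hits : (List Int) × (List Int) := ([0, 0], [0, 1])

-- ===== CLAIM (what is proved, stated in full; the proofs are below) =====
def Claim_unchanged_calculate_hits : Prop := ∀ (guess : String) (actual : String),
  Dom_calculate_hits guess actual → Pre_calculate_hits guess actual →
  Spec_calculate_hits guess actual (calculate_hits guess actual)
def Claim_changed_calculate_hits : Prop :=
  Dom_calculate_hits (pvDiffWitness_calculate_hits.1) (pvDiffWitness_calculate_hits.2) ∧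
  Pre_calculate_hits (pvDiffWitness_calculate_hits.1) (pvDiffWitness_calculate_hits.2) ∧
  D_calculate_hits (pvDiffWitness_calculate_hits.1) (pvDiffWitness_calculate_hits.2) ∧
  calculate_hits (pvDiffWitness_calculate_hits.1) (pvDiffWitness_calculate_hits.2) = pvDiffWitnessOut_calculate_hits.1 ∧
  calculate_hits_alt (pvDiffWitness_calculate_hits.1) (pvDiffWitness_calculate_hits.2) = pvDiffWitnessOut_calculate_hits.2 ∧
  pvDiffWitnessOut_calculate_hits.1 ≠ pvDiffWitnessOut_calculate_hits.2
def Claim_exact_calculate_hits : Prop := ∀ (guess : String) (actual : String),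
  Dom_calculate_hits guess actual → Pre_calculate_hits guess actual →
  D_calculate_hits guess actual →
  calculate_hits guess actual ≠ calculate_hits_alt guess actual
-- ===== LEMMAS AND PROOFS =====

-- Shorthands for the unmatched parts of the two strings (proof-only helpers).
def pvZ (g a : String) : List (Char × Char) := g.toList.zip a.toList
def pvGu (g a : String) : List Char := ((pvZ g a).filter (fun p => p.1 != p.2)).map Prod.fst
def pvAu (g a : String) : List Char :=
  ((pvZ g a).filter (fun p => p.1 != p.2)).map Prod.snd ++ a.toList.drop g.toList.length
def pvI (g a : String) : Multiset Char := ↑(pvAu g a) ∩ ↑(pvGu g a)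

-- A's greedy second pass read off the processed `actual` list (reference recursion).
def pvGreedy (gs : List Char) : List Char → Int
  | [] => 0
  | c :: as =>
      if c ≠ '-' ∧ c ∈ gs then
        1 + pvGreedy (gs.set ((PySem.List.index? gs c).getD 0) '-') as
      else pvGreedy gs as

-- Nat-index step functions (the A port's fold bodies after the Int→Nat index bridge).
def pvStep1 (s : Int × List Char × List Char) (i : Nat) : Int × List Char × List Char :=
  match s.2.1[i]?, s.2.2[i]? with
  | some x, some y => if x = y then (s.1 + 1, s.2.1.set i '-', s.2.2.set i '-') else s
  | _, _ => s
def pvStep2 (s : Int × List Char × List Char) (i : Nat) : Int × List Char × List Char :=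
  match s.2.2[i]? with
  | some c =>
      if c ≠ '-' ∧ c ∈ s.2.1 then
        (s.1 + 1, s.2.1.set ((PySem.List.index? s.2.1 c).getD 0) '-', s.2.2.set i '-')
      else s
  | none => s

lemma pv_bridge {σ : Type} (n : Nat) (step : σ → Int → σ) (f : σ → Nat → σ) (init : σ)
    (hstep : ∀ s (k : Nat), step s (k : Int) = f s k) :
    (PySem.List.pyRange 0 (n : Int) 1).foldl step init = (List.range' 0 n).foldl f init := by
  rw [PySem.List.pyRange_one]
  simp only [Int.sub_zero, Int.toNat_natCast, List.foldl_map, Int.zero_add]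
  rw [List.range_eq_range']
  induction (List.range' 0 n) generalizing init with
  | nil => rfl
  | cons a t ih => simp only [List.foldl_cons, hstep]
lemma pv_drop_set (l : List Char) (k : Nat) (v : Char) :
    (l.set k v).drop (k + 1) = l.drop (k + 1) := by
  induction l generalizing k with
  | nil => simp
  | cons a t ih =>
      cases k with
      | zero => simp
      | succ k => simpa using ih k
lemma pv_take_set (l : List Char) (k : Nat) (v : Char) (hk : k < l.length) :
    (l.set k v).take (k + 1) = l.take k ++ [v] := by
  induction l generalizing k with
  | nil => simp at hk
  | cons a t ih =>
      cases k with
      | zero => simp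
      | succ k => simpa using ih k (by simpa using hk)
lemma pv_getElem?_of_drop {l s : List Char} {k : Nat} {x : Char} (h : l.drop k = x :: s) :
    l[k]? = some x := by
  have : (l.drop k)[0]? = some x := by rw [h]; rfl
  simpa using this
lemma pv_go1 (gs : List Char) : ∀ (as : List Char) (k : Nat) (gcur acur : List Char) (h : Int),
    gcur.drop k = gs → acur.drop k = as → gs.length ≤ as.length →
    (List.range' k gs.length).foldl pvStep1 (h, gcur, acur) =
      (h + ((gs.zip as).countP (fun p => p.1 == p.2) : Int),
       gcur.take k ++ (gs.zip as).map (fun p => if p.1 = p.2 then '-' else p.1),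
       acur.take k ++ (gs.zip as).map (fun p => if p.1 = p.2 then '-' else p.2) ++ as.drop gs.length) := by
  induction gs with
  | nil =>
      intro as k gcur acur h hg ha _
      have hk : gcur.length ≤ k := by
        have := congrArg List.length hg; simp at this; omega
      subst ha
      simp [List.take_of_length_le hk, List.take_append_drop]
  | cons x gs ih =>
      intro as k gcur acur h hg ha hlen
      cases as with
      | nil => simp at hlen
      | cons y as' =>
          have hgx : gcur[k]? = some x := pv_getElem?_of_drop hg
          have hay : acur[k]? = some y := pv_getElem?_of_drop ha
          have hkg : k < gcur.length := by
            have := congrArg List.length hg; simp at this; omega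
          have hka : k < acur.length := by
            have := congrArg List.length ha; simp at this; omega
          have hg' : gcur.drop (k+1) = gs := by
            have : gcur.drop (k+1) = (gcur.drop k).drop 1 := by
              rw [List.drop_drop]
            rw [this, hg]; rfl
          have ha' : acur.drop (k+1) = as' := by
            have : acur.drop (k+1) = (acur.drop k).drop 1 := by
              rw [List.drop_drop]
            rw [this, ha]; rfl
          have hlen' : gs.length ≤ as'.length := by simpa using hlen
          simp only [List.length_cons]
          rw [List.range'_succ, List.foldl_cons]
          by_cases hxy : x = y
          · have hstep : pvStep1 (h, gcur, acur) k
                = (h + 1, gcur.set k '-', acur.set k '-') := by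
              simp [pvStep1, hgx, hay, hxy]
            rw [hstep]
            rw [ih as' (k+1) (gcur.set k '-') (acur.set k '-') (h+1)
                (by rw [pv_drop_set]; exact hg')
                (by rw [pv_drop_set]; exact ha') hlen']
            refine Prod.ext ?_ (Prod.ext ?_ ?_) <;> simp [hxy, pv_take_set _ _ _ hkg, pv_take_set _ _ _ hka]
            · omega
          · have hstep : pvStep1 (h, gcur, acur) k = (h, gcur, acur) := by
              simp [pvStep1, hgx, hay, hxy]
            rw [hstep]
            rw [ih as' (k+1) gcur acur h hg' ha' hlen']
            have htg : gcur.take (k+1) = gcur.take k ++ [x] := by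
              rw [List.take_add_one]; simp [hgx]
            have hta : acur.take (k+1) = acur.take k ++ [y] := by
              rw [List.take_add_one]; simp [hay]
            refine Prod.ext ?_ (Prod.ext ?_ ?_) <;> simp [hxy, htg, hta]
lemma pv_go2 : ∀ (as : List Char) (k : Nat) (acur : List Char) (p : Int) (g : List Char),
    acur.drop k = as →
    ((List.range' k as.length).foldl pvStep2 (p, g, acur)).1 = p + pvGreedy g as := by
  intro as
  induction as with
  | nil => intro k acur p g _; simp [pvGreedy]
  | cons c as' ih =>
      intro k acur p g ha
      have hac : acur[k]? = some c := pv_getElem?_of_drop ha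
      have ha' : acur.drop (k+1) = as' := by
        have : acur.drop (k+1) = (acur.drop k).drop 1 := by rw [List.drop_drop]
        rw [this, ha]; rfl
      simp only [List.length_cons]
      rw [List.range'_succ, List.foldl_cons]
      by_cases hc : c ≠ '-' ∧ c ∈ g
      · have hstep : pvStep2 (p, g, acur) k
            = (p + 1, g.set ((PySem.List.index? g c).getD 0) '-', acur.set k '-') := by
          simp [pvStep2, hac, hc]
        rw [hstep, ih (k+1) _ _ _ (by rw [pv_drop_set]; exact ha')]
        simp [pvGreedy, hc]; omega
      · have hstep : pvStep2 (p, g, acur) k = (p, g, acur) := by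
          simp only [pvStep2, hac]
          rw [if_neg hc]
        rw [hstep, ih (k+1) _ _ _ ha']
        simp [pvGreedy, hc]
lemma pv_mark_filter (gs : List Char) (c : Char) (hc : c ∈ gs) (hne : c ≠ '-') :
    (↑((gs.set ((PySem.List.index? gs c).getD 0) '-').filter (fun x => x != '-')) : Multiset Char)
      = (↑(gs.filter (fun x => x != '-')) : Multiset Char).erase c := by
  induction gs with
  | nil => simp at hc
  | cons a t ih =>
      by_cases hac : a = c
      · subst hac
        rw [PySem.List.index?_cons_self]
        simp only [Option.getD_some, List.set_cons_zero]
        have : (a == '-') = false := by simpa using hne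
        simp [List.filter_cons, this, hne]
      · have hct : c ∈ t := by cases hc with
          | head => exact absurd rfl hac
          | tail _ h => exact h
        rw [PySem.List.index?_cons_of_ne t hac]
        have hsome : ∃ j, PySem.List.index? t c = some j := by
          have := PySem.List.index?_isSome_iff (xs := t) (v := c)
          rcases Option.isSome_iff_exists.mp (this.mpr hct) with ⟨j, hj⟩
          exact ⟨j, hj⟩
        obtain ⟨j, hj⟩ := hsome
        rw [hj]
        simp only [Option.map_some, Option.getD_some, List.set_cons_succ]
        by_cases ha' : a = '-'
        · subst ha'
          simp only [List.filter_cons, bne_self_eq_false, Bool.false_eq_true, if_neg]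
          have := ih hct
          rw [hj] at this
          simpa using this
        · have hbne : (a != '-') = true := by simpa using ha'
          simp only [List.filter_cons, hbne, if_pos]
          have := ih hct
          rw [hj] at this
          simp only [Option.getD_some] at this
          rw [← Multiset.cons_coe, ← Multiset.cons_coe,
            Multiset.erase_cons_tail _ (show a ≠ c from hac), this]
lemma pv_greedy_card : ∀ (as gs : List Char),
    pvGreedy gs as =
      ((↑(as.filter (fun x => x != '-')) ∩ ↑(gs.filter (fun x => x != '-')) : Multiset Char).card : Int) := by
  intro as
  induction as with
  | nil => intro gs; simp [pvGreedy]
  | cons c as' ih =>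
      intro gs
      by_cases hc : c ≠ '-' ∧ c ∈ gs
      · have hcf : c ∈ (↑(gs.filter (fun x => x != '-')) : Multiset Char) := by
          simp [List.mem_filter, hc.2, hc.1]
        have hfc : (c :: as').filter (fun x => x != '-') = c :: as'.filter (fun x => x != '-') := by
          simp [List.filter_cons, hc.1]
        rw [pvGreedy, if_pos hc, ih, hfc]
        rw [← Multiset.cons_coe, Multiset.cons_inter_of_pos _ hcf]
        rw [pv_mark_filter gs c hc.2 hc.1]
        simp; omega
      · rw [pvGreedy, if_neg hc, ih]
        by_cases hd : c = '-'
        · subst hd; simp [List.filter_cons]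
        · have hmem : c ∉ gs := by
            by_contra hm; exact hc ⟨hd, hm⟩
          have hfc : (c :: as').filter (fun x => x != '-') = c :: as'.filter (fun x => x != '-') := by
            simp [List.filter_cons, hd]
          rw [hfc, ← Multiset.cons_coe, Multiset.cons_inter_of_neg]
          simp [List.mem_filter, hmem]
lemma pv_filter_fst (l : List (Char × Char)) :
    ((l.map (fun p => if p.1 = p.2 then '-' else p.1)).filter (fun x => x != '-'))
      = (((l.filter (fun p => p.1 != p.2)).map (·.1)).filter (fun x => x != '-')) := by
  induction l with
  | nil => rfl
  | cons p t ih =>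
      by_cases hp : p.1 = p.2
      · simp only [List.map_cons, List.filter_cons, if_pos hp]
        have h2 : (p.1 != p.2) = false := by simpa using hp
        simp [h2, ih]
      · have h2 : (p.1 != p.2) = true := by simpa using hp
        by_cases hd : p.1 = '-'
        · have h4 : (p.1 != '-') = false := by simp [hd]
          simp only [List.map_cons, List.filter_cons, if_neg hp, h2, if_pos, h4,
            Bool.false_eq_true, if_neg, ih]
        · have h3 : (p.1 != '-') = true := by simpa using hd
          simp [List.filter_cons, if_neg hp, h2, h3, ih]
lemma pv_filter_snd (l : List (Char × Char)) :
    ((l.map (fun p => if p.1 = p.2 then '-' else p.2)).filter (fun x => x != '-'))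
      = (((l.filter (fun p => p.1 != p.2)).map (·.2)).filter (fun x => x != '-')) := by
  induction l with
  | nil => rfl
  | cons p t ih =>
      by_cases hp : p.1 = p.2
      · simp only [List.map_cons, List.filter_cons, if_pos hp]
        have h2 : (p.1 != p.2) = false := by simpa using hp
        simp [h2, ih]
      · have h2 : (p.1 != p.2) = true := by simpa using hp
        by_cases hd : p.2 = '-'
        · have h4 : (p.2 != '-') = false := by simp [hd]
          simp only [List.map_cons, List.filter_cons, if_neg hp, h2, if_pos, h4,
            Bool.false_eq_true, if_neg, ih]
        · have h3 : (p.2 != '-') = true := by simpa using hd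
          simp [List.filter_cons, if_neg hp, h2, h3, ih]

-- ---- new combinatorial lemmas for B ----

lemma pv_count_filter_bne (l : List Char) (c : Char) :
    (l.filter (fun x => x != '-')).count c = if c = '-' then 0 else l.count c := by
  by_cases hc : c = '-'
  · subst hc
    rw [if_pos rfl, List.count_eq_zero]
    intro hmem
    have := (List.mem_filter.mp hmem).2
    simp at this
  · rw [if_neg hc, List.count_filter (by simpa using hc)]
lemma pv_inter_filter (A G : List Char) :
    (↑(A.filter (fun x => x != '-')) ∩ ↑(G.filter (fun x => x != '-')) : Multiset Char)
      = (↑A ∩ ↑G : Multiset Char).filter (fun c => ¬ c = '-') := by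
  refine Multiset.ext.mpr ?_
  intro c
  rw [Multiset.count_filter]
  simp only [Multiset.count_inter, Multiset.coe_count]
  rw [pv_count_filter_bne, pv_count_filter_bne]
  by_cases hc : c = '-' <;> simp [hc]
lemma pv_add_inter_add (M A G : Multiset Char) : (M + A) ∩ (M + G) = M + A ∩ G := by
  refine Multiset.ext.mpr ?_
  intro c
  simp only [Multiset.count_inter, Multiset.count_add]
  omega
lemma pv_map_snd_zip_take : ∀ (g a : List Char), (g.zip a).map Prod.snd = a.take g.length := by
  intro g
  induction g with
  | nil => intro a; simp
  | cons x g ih =>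
      intro a
      cases a with
      | nil => simp
      | cons y a => simp [ih]
lemma pv_perm_split (z : List (Char × Char)) (f : Char × Char → Char) :
    (↑(z.map f) : Multiset Char)
      = ↑((z.filter (fun p => p.1 == p.2)).map f) + ↑((z.filter (fun p => p.1 != p.2)).map f) := by
  have hnp : (fun p : Char × Char => p.1 != p.2) = (fun p => !(p.1 == p.2)) := by
    funext p; simp [bne]
  rw [hnp]
  calc (↑(z.map f) : Multiset Char)
      = ↑(((z.filter (fun p => p.1 == p.2)).map f) ++ ((z.filter (fun p => !(p.1 == p.2))).map f)) :=
        Multiset.coe_eq_coe.mpr (by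
          rw [← List.map_append]
          exact ((List.filter_append_perm _ z).map f).symm)
    _ = ↑((z.filter (fun p => p.1 == p.2)).map f) + ↑((z.filter (fun p => !(p.1 == p.2))).map f) := by
        simp
lemma pv_matched_eq (z : List (Char × Char)) :
    (z.filter (fun p => p.1 == p.2)).map Prod.fst = (z.filter (fun p => p.1 == p.2)).map Prod.snd := by
  refine List.map_congr_left ?_
  intro p hp
  have := (List.mem_filter.mp hp).2
  simpa using this

-- B's decrement loop: state dict = remaining multiset R; result adds |as ∩ R|.
lemma pv_ov : ∀ (as : List Char) (ov : Int) (d : PySem.Dict Char Int) (R : Multiset Char),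
    (∀ c, d.getD c 0 = (R.count c : Int)) →
    (as.foldl (fun (s : Int × PySem.Dict Char Int) c =>
        if s.2.getD c 0 > 0 then (s.1 + 1, s.2.insert c (s.2.getD c 0 - 1)) else s) (ov, d)).1
      = ov + (((↑as ∩ R : Multiset Char)).card : Int) := by
  intro as
  induction as with
  | nil => intro ov d R _; simp
  | cons c t ih =>
      intro ov d R hd
      simp only [List.foldl_cons]
      by_cases hc : 0 < R.count c
      · have hmem : c ∈ R := Multiset.count_pos.mp hc
        have hcond : d.getD c 0 > 0 := by rw [hd]; exact_mod_cast hc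
        rw [if_pos hcond]
        have hd' : ∀ c', (d.insert c (d.getD c 0 - 1)).getD c' 0 = ((R.erase c).count c' : Int) := by
          intro c'
          rw [PySem.Dict.getD_insert]
          by_cases hcc : c' = c
          · subst hcc
            rw [if_pos rfl, hd, Multiset.count_erase_self]
            omega
          · rw [if_neg hcc, hd, Multiset.count_erase_of_ne hcc]
        rw [ih (ov + 1) _ (R.erase c) hd']
        rw [← Multiset.cons_coe, Multiset.cons_inter_of_pos _ hmem]
        simp; omega
      · have hcond : ¬ d.getD c 0 > 0 := by rw [hd]; omega
        rw [if_neg hcond]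
        rw [ih ov d R hd]
        rw [← Multiset.cons_coe, Multiset.cons_inter_of_neg _ (by
          intro hmem; exact hc (Multiset.count_pos.mpr hmem))]

lemma pv_hit_eq (z : List (Char × Char)) (a : Int) :
    z.foldl (fun h p => if p.1 = p.2 then h + 1 else h) a
      = a + (z.countP (fun p => p.1 == p.2) : Int) := by
  induction z generalizing a with
  | nil => simp
  | cons p t ih =>
      by_cases hp : p.1 = p.2
      · simp only [List.foldl_cons, if_pos hp, ih, List.countP_cons]
        have : (p.1 == p.2) = true := by simpa using hp
        simp [this]; omega
      · simp only [List.foldl_cons, if_neg hp, ih, List.countP_cons]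
        have : (p.1 == p.2) = false := by simpa using hp
        simp [this]

-- decomposition of the full multisets into matched part + unmatched part
lemma pv_decomp (guess actual : String)
    (hpre : guess.toList.length ≤ actual.toList.length) :
    (↑guess.toList : Multiset Char)
        = ↑(((pvZ guess actual).filter (fun p => p.1 == p.2)).map Prod.fst) + ↑(pvGu guess actual) ∧
    (↑actual.toList : Multiset Char)
        = ↑(((pvZ guess actual).filter (fun p => p.1 == p.2)).map Prod.fst) + ↑(pvAu guess actual) := by
  constructor
  · have hg : guess.toList = (pvZ guess actual).map Prod.fst := by
      rw [pvZ, List.map_fst_zip hpre]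
    rw [hg, pv_perm_split, pvGu]
  · have ha : actual.toList
        = (pvZ guess actual).map Prod.snd ++ actual.toList.drop guess.toList.length := by
      rw [pvZ, pv_map_snd_zip_take, List.take_append_drop]
    calc (↑actual.toList : Multiset Char)
        = ↑((pvZ guess actual).map Prod.snd) + ↑(actual.toList.drop guess.toList.length) := by
          conv_lhs => rw [ha]
          rw [← Multiset.coe_add]
      _ = (↑(((pvZ guess actual).filter (fun p => p.1 == p.2)).map Prod.snd)
            + ↑(((pvZ guess actual).filter (fun p => p.1 != p.2)).map Prod.snd))
            + ↑(actual.toList.drop guess.toList.length) := by rw [← pv_perm_split]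
      _ = ↑(((pvZ guess actual).filter (fun p => p.1 == p.2)).map Prod.fst) + ↑(pvAu guess actual) := by
          rw [pv_matched_eq, pvAu]
          simp [add_assoc]

-- the two ports' values, in closed form
lemma pv_A_eq (guess actual : String)
    (hpre : guess.toList.length ≤ actual.toList.length) :
    calculate_hits guess actual
      = [((pvZ guess actual).countP (fun p => p.1 == p.2) : Int),
         ((((pvI guess actual)).filter (fun c => ¬ c = '-')).card : Int)] := by
  set g0 := guess.toList with hg0
  set a0 := actual.toList with ha0
  set z := g0.zip a0 with hz
  set mg : List Char := z.map (fun p => if p.1 = p.2 then '-' else p.1) with hmg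
  set ma : List Char := z.map (fun p => if p.1 = p.2 then '-' else p.2) ++ a0.drop g0.length with hma
  have hA1 : (PySem.List.pyRange 0 (PySem.List.len g0) 1).foldl
      (fun (s : Int × List Char × List Char) i =>
        match PySem.List.pyGet? s.2.1 i, PySem.List.pyGet? s.2.2 i with
        | some x, some y =>
            if x = y then (s.1 + 1, s.2.1.set i.toNat '-', s.2.2.set i.toNat '-') else s
        | _, _ => s)
      (0, g0, a0)
      = ((z.countP (fun p => p.1 == p.2) : Int), mg, ma) := by
    rw [PySem.List.len_eq]
    rw [pv_bridge g0.length _ pvStep1 _ (by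
      intro s k
      simp [pvStep1])]
    rw [pv_go1 g0 a0 0 g0 a0 0 (by simp) (by simp) hpre]
    simp [hz, hmg, hma]
  have hA2 : ((PySem.List.pyRange 0 (PySem.List.len ma) 1).foldl
      (fun (s : Int × List Char × List Char) i =>
        match PySem.List.pyGet? s.2.2 i with
        | some c =>
            if c ≠ '-' ∧ c ∈ s.2.1 then
              (s.1 + 1, s.2.1.set ((PySem.List.index? s.2.1 c).getD 0) '-', s.2.2.set i.toNat '-')
            else s
        | none => s)
      (0, mg, ma)).1 = pvGreedy mg ma := by
    rw [PySem.List.len_eq]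
    rw [pv_bridge ma.length _ pvStep2 _ (by
      intro s k
      simp [pvStep2])]
    rw [pv_go2 ma 0 ma 0 mg (by simp)]
    omega
  have hA : calculate_hits guess actual
      = [(z.countP (fun p => p.1 == p.2) : Int), pvGreedy mg ma] := by
    rw [calculate_hits]
    simp only [← hg0, ← ha0]
    rw [hA1]
    simp only []
    rw [hA2]
  rw [hA, pv_greedy_card ma mg]
  have hfe : ma.filter (fun x => x != '-') = (pvAu guess actual).filter (fun x => x != '-') := by
    rw [hma, pvAu, List.filter_append, List.filter_append, pv_filter_snd]; rfl
  have hge : mg.filter (fun x => x != '-') = (pvGu guess actual).filter (fun x => x != '-') := by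
    rw [hmg, pv_filter_fst]; rfl
  rw [hfe, hge, pv_inter_filter]
  rfl
lemma pv_B_eq (guess actual : String)
    (hpre : guess.toList.length ≤ actual.toList.length) :
    calculate_hits_alt guess actual
      = [((pvZ guess actual).countP (fun p => p.1 == p.2) : Int),
         (((pvI guess actual)).card : Int)] := by
  obtain ⟨hG, hA⟩ := pv_decomp guess actual hpre
  rw [calculate_hits_alt]
  rw [pv_hit_eq]
  rw [PySem.Dict.foldl_insert_getD_add_one_eq_counter]
  rw [pv_ov actual.toList 0 _ (↑guess.toList) (by
    intro c
    rw [PySem.Dict.getD_counter, Multiset.coe_count])]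
  have hcountP : (guess.toList.zip actual.toList).countP (fun p => decide (p.1 = p.2))
      = (pvZ guess actual).countP (fun p => p.1 == p.2) := by
    refine List.countP_congr ?_
    intro p _
    by_cases h : p.1 = p.2 <;> simp [h]
  have hinter : (↑actual.toList ∩ ↑guess.toList : Multiset Char)
      = ↑(((pvZ guess actual).filter (fun p => p.1 == p.2)).map Prod.fst) + pvI guess actual := by
    rw [hG, hA, pv_add_inter_add, pvI]
  have hlen : (((pvZ guess actual).filter (fun p => p.1 == p.2)).map Prod.fst).length
      = (pvZ guess actual).countP (fun p => p.1 == p.2) := by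
    rw [List.length_map, ← List.countP_eq_length_filter]
  rw [hinter]
  simp only [Multiset.card_add, Multiset.coe_card, zero_add, hlen]
  simp only [pvZ]
  congr 1
  push_cast
  ring

-- the intersection's count of '-' is what D_ measures
lemma pv_D_iff (guess actual : String) :
    D_calculate_hits guess actual ↔ 0 < (pvI guess actual).count '-' := by
  have hGu : (pvGu guess actual).count '-'
      = (guess.toList.zip actual.toList).countP (fun p => p.1 == '-' && p.1 != p.2) := by
    rw [pvGu, List.count, List.countP_map, pvZ, List.countP_filter]
    rfl
  have hAu : (pvAu guess actual).count '-'
      = (guess.toList.zip actual.toList).countP (fun p => p.2 == '-' && p.1 != p.2)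
        + (actual.toList.drop guess.toList.length).count '-' := by
    rw [pvAu, List.count_append, List.count, List.countP_map, pvZ, List.countP_filter]
    rfl
  rw [pvI]
  simp only [Multiset.count_inter, Multiset.coe_count, hGu, hAu, D_calculate_hits]
  omega

-- ===== VERDICT (by name: the statements are the Claim_ definitions above) =====
theorem calculate_hits_spec : Claim_unchanged_calculate_hits := by
  intro guess actual _ hpre
  unfold Spec_calculate_hits
  intro hnd
  rw [pv_A_eq guess actual hpre, pv_B_eq guess actual hpre]
  have hzero : (pvI guess actual).count '-' = 0 := by
    have := (pv_D_iff guess actual).not.mp hnd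
    omega
  have hfe : (pvI guess actual).filter (fun c => ¬ c = '-') = pvI guess actual := by
    refine Multiset.filter_eq_self.mpr ?_
    intro c hc hcd
    subst hcd
    exact absurd (Multiset.count_pos.mpr hc) (by omega)
  rw [hfe]
theorem calculate_hits_changed : Claim_changed_calculate_hits := by
  unfold Claim_changed_calculate_hits; decide
theorem calculate_hits_tight : Claim_exact_calculate_hits := by
  intro guess actual _ hpre hd
  rw [pv_A_eq guess actual hpre, pv_B_eq guess actual hpre]
  have hpos : 0 < (pvI guess actual).count '-' := (pv_D_iff guess actual).mp hd
  have hsplit : ((pvI guess actual).filter (fun c => ¬ c = '-')).card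
      + ((pvI guess actual).filter (fun c => ¬ ¬ c = '-')).card = (pvI guess actual).card := by
    rw [← Multiset.card_add, Multiset.filter_add_not]
  have hcnt : (pvI guess actual).count '-'
      ≤ ((pvI guess actual).filter (fun c => ¬ ¬ c = '-')).card := by
    have : (pvI guess actual).count '-'
        = ((pvI guess actual).filter (fun c => ¬ ¬ c = '-')).count '-' := by
      rw [Multiset.count_filter]; simp
    rw [this]
    exact Multiset.count_le_card _ _
  have hlt : ((pvI guess actual).filter (fun c => ¬ c = '-')).card < (pvI guess actual).card := by
    omega
  intro heq
  have := List.cons.injEq .. ▸ heq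
  simp only [List.cons.injEq] at heq
  have h2 := heq.2.1
  have : (((pvI guess actual).filter (fun c => ¬ c = '-')).card : Int)
      < ((pvI guess actual).card : Int) := by exact_mod_cast hlt
  omega
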